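-- pv_equiv track=rewrite | github.com/MDBAuth/EWR_tool | dashboard.py | analysis_selection_matching
-- ===== SOURCE A (Python) =====
-- import itertools
--
-- def analysis_selection_matching(user_selections):
--     ''' Match boolean user inputs to options for analysis. If frequency is selected, the program
--     adds in the target frequency. Returns the list of requests '''
--
--     analysis_choices = ['Years with events', 'Frequency', 'Max dry', 'Years since last event',
--                        'Number of events', 'Average event length', 'Average events per year',
--                         'Average time between events', 'Average days above low flow',
--                         'Average CtF days per year', 'Average length CtF spells']
--     list_of_requests =  list(itertools.compress(analysis_choices, user_selections))
--
--     for i in range(len(list_of_requests)):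
--         if list_of_requests[i] == 'Frequency':
--             list_of_requests.insert(i+1, 'Target frequency')
--
--     return list_of_requests
-- ===== SOURCE B (Python) =====
-- _EXPANSIONS = [
--     ['Years with events'],
--     ['Frequency', 'Target frequency'],
--     ['Max dry'],
--     ['Years since last event'],
--     ['Number of events'],
--     ['Average event length'],
--     ['Average events per year'],
--     ['Average time between events'],
--     ['Average days above low flow'],
--     ['Average CtF days per year'],
--     ['Average length CtF spells'],
-- ]
--
-- def analysis_selection_matching(user_selections):
--     ''' Match boolean user inputs to options for analysis. If frequency is selected, the program
--     adds in the target frequency. Returns the list of requests '''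
--     def go(groups, sels):
--         if not groups or not sels:
--             return []
--         rest = go(groups[1:], sels[1:])
--         return groups[0] + rest if sels[0] else rest
--     return go(_EXPANSIONS, user_selections)
-- ===== Notes on version B (the rewrite author's own statement) =====
-- stated objective: alternative
-- what changed: Replaced A's two-pass structure (materialise itertools.compress into a list, then rescan it by index and mutate it with insert) by a precomputed expansion table (each choice mapped to the label group it contributes, 'Frequency' already paired with 'Target frequency') consumed by a single recursive traversal of the two lists.
import Mathlib
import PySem

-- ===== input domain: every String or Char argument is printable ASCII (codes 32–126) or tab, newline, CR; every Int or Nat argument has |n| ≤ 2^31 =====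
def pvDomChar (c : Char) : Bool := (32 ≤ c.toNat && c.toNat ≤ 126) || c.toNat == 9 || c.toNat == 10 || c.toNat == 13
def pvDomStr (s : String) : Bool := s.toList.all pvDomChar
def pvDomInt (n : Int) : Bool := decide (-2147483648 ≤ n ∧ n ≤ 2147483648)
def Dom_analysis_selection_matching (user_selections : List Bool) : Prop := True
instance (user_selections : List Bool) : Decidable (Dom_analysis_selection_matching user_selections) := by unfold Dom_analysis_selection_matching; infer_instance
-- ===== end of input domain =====

-- B replaces A's compress-then-rescan-and-insert two passes by a precomputed expansion table
-- ('Frequency' already paired with 'Target frequency') consumed recursively; objective: alternative.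

-- ===== PORT A =====
-- itertools.compress(choices, sel) with bool selectors = filterMap over the (truncating) zip; exact.
def analysis_selection_matching (user_selections : List Bool) : List String :=
  let analysis_choices : List String :=
    ["Years with events", "Frequency", "Max dry", "Years since last event",
     "Number of events", "Average event length", "Average events per year",
     "Average time between events", "Average days above low flow",
     "Average CtF days per year", "Average length CtF spells"]
  let list_of_requests :=
    (analysis_choices.zip user_selections).filterMap (fun p => if p.2 then some p.1 else none)
  -- range(len(list_of_requests)) is evaluated once, before the loop mutates the list;
  -- every index i is in range of the (only growing) list, so pyGetD with default "" equals Python's l[i].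
  (PySem.List.pyRange 0 (list_of_requests.length : Int) 1).foldl
    (fun l i =>
      if PySem.List.pyGetD l i "" = "Frequency" then PySem.List.insert l (i + 1) "Target frequency"
      else l)
    list_of_requests

-- ===== PORT B =====
def pvExpansions : List (List String) :=
  [["Years with events"],
   ["Frequency", "Target frequency"],
   ["Max dry"],
   ["Years since last event"],
   ["Number of events"],
   ["Average event length"],
   ["Average events per year"],
   ["Average time between events"],
   ["Average days above low flow"],
   ["Average CtF days per year"],
   ["Average length CtF spells"]]

def pvGo : List (List String) → List Bool → List String
  | [], _ => []
  | _ :: _, [] => []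
  | g :: gs, s :: ss => if s then g ++ pvGo gs ss else pvGo gs ss

def analysis_selection_matching_alt (user_selections : List Bool) : List String :=
  pvGo pvExpansions user_selections

-- ===== PRECONDITION & SPEC =====
def Spec_analysis_selection_matching (user_selections : List Bool) (out : List String) : Prop := out = analysis_selection_matching_alt user_selections
instance (user_selections : List Bool) (out : List String) : Decidable (Spec_analysis_selection_matching user_selections out) := by unfold Spec_analysis_selection_matching; infer_instance

-- ===== CLAIM (what is proved, stated in full; the proofs are below) =====
def Claim_equal_analysis_selection_matching : Prop := ∀ (user_selections : List Bool), Dom_analysis_selection_matching user_selections → Spec_analysis_selection_matching user_selections (analysis_selection_matching user_selections)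

-- ===== LEMMAS AND PROOFS =====

-- Proof-only helpers (not used by the ports).
def pvExpand (s : String) : List String :=
  if s = "Frequency" then [s, "Target frequency"] else [s]

def pvStepA (l : List String) (i : Int) : List String :=
  if PySem.List.pyGetD l i "" = "Frequency" then PySem.List.insert l (i + 1) "Target frequency" else l

-- B's recursion over the expansion table flat-maps pvExpand over the compressed choices.
theorem pv_go_eq (cs : List String) (us : List Bool) :
    pvGo (cs.map pvExpand) us
      = ((cs.zip us).filterMap (fun p => if p.2 then some p.1 else none)).flatMap pvExpand := by
  induction cs generalizing us with
  | nil => cases us <;> rfl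
  | cons c cs ih =>
    cases us with
    | nil => rfl
    | cons b bs =>
      cases b with
      | false => simpa [pvGo] using ih bs
      | true => simp [pvGo, ih bs]

-- A's insert loop does nothing over indices whose element is not "Frequency".
theorem pv_loop_skip (idxs : List Int) (l : List String)
    (h : ∀ i ∈ idxs, PySem.List.pyGetD l i "" ≠ "Frequency") :
    idxs.foldl pvStepA l = l := by
  induction idxs with
  | nil => rfl
  | cons i is ih =>
    have hi := h i (by simp)
    simp only [List.foldl_cons, pvStepA, if_neg hi]
    exact ih fun j hj => h j (by simp [hj])

-- the compressed list is a sublist of the choices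
theorem pv_compress_sublist (cs : List String) (us : List Bool) :
    ((cs.zip us).filterMap (fun p => if p.2 then some p.1 else none)).Sublist cs := by
  induction cs generalizing us with
  | nil => simp
  | cons c cs ih =>
    cases us with
    | nil => simp
    | cons b bs =>
      cases b with
      | false => simpa using (ih bs).cons c
      | true => simpa using (ih bs).cons₂ c

theorem pv_expand_id (l : List String) (h : "Frequency" ∉ l) :
    l.flatMap pvExpand = l := by
  induction l with
  | nil => rfl
  | cons x xs ih =>
    have hx : x ≠ "Frequency" := fun he => h (he ▸ List.mem_cons_self)
    simp only [List.flatMap_cons, pvExpand, if_neg hx,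
      ih fun hm => h (List.mem_cons_of_mem _ hm)]
    rfl

-- the core: A's loop on a list containing exactly one "Frequency" inserts right after it
theorem pv_loop_insert (as bs : List String)
    (ha : "Frequency" ∉ as) (hb : "Frequency" ∉ bs) :
    (PySem.List.pyRange 0 (((as ++ "Frequency" :: bs).length : Nat) : Int) 1).foldl
      pvStepA (as ++ "Frequency" :: bs)
    = as ++ "Frequency" :: "Target frequency" :: bs := by
  set l0 : List String := as ++ "Frequency" :: bs with hl0
  set l1 : List String := as ++ "Frequency" :: "Target frequency" :: bs with hl1
  have hL : l0.length = as.length + 1 + bs.length := by simp [hl0]; omega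
  have e1 : PySem.List.pyRange 0 (l0.length : Int) 1
      = PySem.List.pyRange 0 (as.length : Int) 1
        ++ PySem.List.pyRange (as.length : Int) (l0.length : Int) 1 :=
    PySem.List.pyRange_one_append _ _ _ (by omega) (by omega)
  have e2 : PySem.List.pyRange (as.length : Int) (l0.length : Int) 1
      = PySem.List.pyRange (as.length : Int) ((as.length : Int) + 1) 1
        ++ PySem.List.pyRange ((as.length : Int) + 1) (l0.length : Int) 1 :=
    PySem.List.pyRange_one_append _ _ _ (by omega) (by omega)
  rw [e1, e2, List.foldl_append, List.foldl_append]
  -- phase 1: indices below as.length leave l0 unchanged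
  have h1 : (PySem.List.pyRange 0 (as.length : Int) 1).foldl pvStepA l0 = l0 := by
    apply pv_loop_skip
    intro i hi
    rw [PySem.List.mem_pyRange_one] at hi
    obtain ⟨k, rfl⟩ : ∃ k : Nat, i = (k : Int) := ⟨i.toNat, by omega⟩
    have hk : k < as.length := by exact_mod_cast hi.2
    rw [PySem.List.pyGetD_natCast]
    have : l0.getD k "" = as[k] := by
      rw [List.getD_eq_getElem _ _ (by omega)]
      exact List.getElem_append_left (by omega)
    rw [this]
    exact fun he => ha (he ▸ List.getElem_mem _)
  rw [h1]
  -- phase 2: the single index as.length performs the insert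
  have h2 : (PySem.List.pyRange (as.length : Int) ((as.length : Int) + 1) 1).foldl pvStepA l0 = l1 := by
    rw [PySem.List.pyRange_one_singleton]
    simp only [List.foldl_cons, List.foldl_nil, pvStepA]
    have hget : PySem.List.pyGetD l0 (as.length : Int) "" = "Frequency" := by
      rw [PySem.List.pyGetD_natCast,
          List.getD_eq_getElem _ _ (by omega)]
      rw [List.getElem_append_right (le_refl as.length)]
      simp
    rw [if_pos hget]
    have hcast : ((as.length : Int) + 1) = ((as.length + 1 : Nat) : Int) := by push_cast; ring
    rw [hcast, PySem.List.insert_natCast _ _ _ (by omega)]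
    have ht : l0.take (as.length + 1) = as ++ ["Frequency"] := by
      rw [hl0, List.take_append]; simp
    have hd : l0.drop (as.length + 1) = bs := by
      rw [hl0]
      simp only [List.drop_length_add_append, List.drop_succ_cons, List.drop_zero]
    rw [ht, hd, hl1]; simp
  rw [h2]
  -- phase 3: indices above as.length see "Target frequency" or elements of bs
  apply pv_loop_skip
  intro i hi
  rw [PySem.List.mem_pyRange_one] at hi
  obtain ⟨k, rfl⟩ : ∃ k : Nat, i = (k : Int) := ⟨i.toNat, by omega⟩
  have hk1 : as.length + 1 ≤ k := by exact_mod_cast hi.1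
  have hk2 : (k : Int) < (l0.length : Int) := hi.2
  have hk2' : k < l0.length := by exact_mod_cast hk2
  have hL1 : l1.length = as.length + 1 + 1 + bs.length := by simp [hl1]; omega
  have hklt : k < l1.length := by omega
  rw [PySem.List.pyGetD_natCast, List.getD_eq_getElem _ _ hklt]
  have hrest : l1[k] = ("Frequency" :: "Target frequency" :: bs)[k - as.length]'(by
      simp; omega) := by
    exact List.getElem_append_right (by omega)
  rw [hrest]
  obtain ⟨m, hm⟩ : ∃ m, k - as.length = m + 1 := ⟨k - as.length - 1, by omega⟩
  have : ("Frequency" :: "Target frequency" :: bs)[k - as.length]'(by simp; omega)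
      = ("Target frequency" :: bs)[m]'(by simp; omega) := by
    simp [hm]
  rw [this]
  intro he
  have hmem : "Frequency" ∈ ("Target frequency" :: bs) := he ▸ List.getElem_mem _
  rcases List.mem_cons.mp hmem with h | h
  · exact absurd h.symm (by decide)
  · exact hb h

-- ===== VERDICT (by name: the statement is the Claim_ definition above) =====
theorem analysis_selection_matching_spec : Claim_equal_analysis_selection_matching := by
  intro us _
  unfold Spec_analysis_selection_matching analysis_selection_matching analysis_selection_matching_alt
  simp only []
  set cs : List String :=
    ["Years with events", "Frequency", "Max dry", "Years since last event",
     "Number of events", "Average event length", "Average events per year",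
     "Average time between events", "Average days above low flow",
     "Average CtF days per year", "Average length CtF spells"] with hcs
  have htable : pvExpansions = cs.map pvExpand := by rw [hcs]; decide
  rw [htable, pv_go_eq]
  set l0 := (cs.zip us).filterMap (fun p => if p.2 then some p.1 else none) with hl0
  show (PySem.List.pyRange 0 (l0.length : Int) 1).foldl pvStepA l0 = l0.flatMap pvExpand
  have hcount : l0.count "Frequency" ≤ 1 := by
    calc l0.count "Frequency" ≤ cs.count "Frequency" :=
          (pv_compress_sublist cs us).count_le _
      _ = 1 := by decide
  by_cases hmem : "Frequency" ∈ l0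
  · obtain ⟨as, bs, hdec⟩ := List.append_of_mem hmem
    have hca : "Frequency" ∉ as ∧ "Frequency" ∉ bs := by
      rw [hdec] at hcount
      simp [List.count_append] at hcount
      constructor <;> intro h <;>
        [exact absurd (List.count_pos_iff.mpr h) (by omega);
         exact absurd (List.count_pos_iff.mpr h) (by omega)]
    rw [hdec, pv_loop_insert as bs hca.1 hca.2]
    rw [List.flatMap_append, pv_expand_id as hca.1]
    simp [pvExpand, pv_expand_id bs hca.2]
  · rw [pv_expand_id l0 hmem]
    apply pv_loop_skip
    intro i hi
    rw [PySem.List.mem_pyRange_one] at hi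
    obtain ⟨k, rfl⟩ : ∃ k : Nat, i = (k : Int) := ⟨i.toNat, by omega⟩
    have hk : k < l0.length := by exact_mod_cast hi.2
    rw [PySem.List.pyGetD_natCast, List.getD_eq_getElem _ _ hk]
    exact fun he => hmem (he ▸ List.getElem_mem _)
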